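-- pv_equiv track=rewrite | github.com/tzurshubi/BiHS | src/cib_app.py | classify_path
-- ===== SOURCE A (Python) =====
-- def classify_path(path, d: int):
--     """
--     Classify a path in Q_d as one of:
--       - "snake"        (induced simple path)
--       - "coil"         (induced simple cycle)
--       - "almost coil"  (open path that would be a coil if closed)
--       - "not snake"    otherwise
--     Returns: (label, is_valid)
--     """
--
--     if not path or len(path) <= 1:
--         return "snake", True  # trivial path treated as snake
--
--     # Is the path explicitly closed (first == last)?
--     is_closed = (path[0] == path[-1])
--
--     # Work with a version without duplicate endpoint when closed
--     cycle = path[:-1] if is_closed else path[:]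
--     n = len(cycle)
--
--     # --- 1) all vertices must be distinct ---
--     if len(set(cycle)) != n:
--         return "not snake", False
--
--     # --- 2) consecutive vertices must be adjacent ---
--     for i in range(n - 1):
--         if hamming_dist(cycle[i], cycle[i + 1]) != 1:
--             return "not snake", False
--
--     # Whether the endpoints (0, n-1) are adjacent in Q_d
--     closing_adjacent = (hamming_dist(cycle[0], cycle[-1]) == 1)
--
--     # If the user claims a cycle (is_closed), that closing edge must exist
--     if is_closed and not closing_adjacent:
--         return "not snake", False
--
--     # --- 3) inducedness: no chords among internal pairs ---
--     # We forbid adjacency for any non-consecutive pair (i,j),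
--     # BUT we always skip (0, n-1) because that edge is either:
--     #    - the actual closing edge of a coil, or
--     #    - the would-be closing edge of an "almost coil".
--     for i in range(n):
--         for j in range(i + 1, n):
--             # Skip the path edges
--             if j == i + 1:
--                 continue
--             # Skip endpoints pair (0, n-1) in both open/closed cases
--             if i == 0 and j == n - 1:
--                 continue
--             if hamming_dist(cycle[i], cycle[j]) == 1:
--                 return "not snake", False
--
--     # --- 4) classification based on closure + endpoint adjacency ---
--
--     if is_closed:
--         # distinct, consecutive adjacent, closed by an edge, no chords
--         return "coil", True
--
--     # Open path, induced
--     if closing_adjacent: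
--         # Endpoints adjacent → would be a coil if closed
--         return "almost coil", True
--
--     return "snake", True
--
-- def hamming_dist(a: int, b: int) -> int:
--     x, c = a ^ b, 0
--     while x:
--         c += x & 1
--         x >>= 1
--     return c
-- ===== SOURCE B (Python) =====
-- # B: same classification, but chord detection uses a hash index of the vertices and
-- # single-bit flips (O(n*L) lookups) instead of A's all-pairs Hamming scan, and edges
-- # are tested with int.bit_count instead of a hand-written popcount loop.
--
-- def _is_edge(u, v):
--     return (u ^ v).bit_count() == 1
--
--
-- def classify_path(path, d: int):
--     if len(path) <= 1:
--         return "snake", True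
--     is_closed = path[0] == path[-1]
--     cycle = path[:-1] if is_closed else path
--     n = len(cycle)
--     index = {}
--     for i, v in enumerate(cycle):
--         if v in index:
--             return "not snake", False
--         index[v] = i
--     for i in range(n - 1):
--         if not _is_edge(cycle[i], cycle[i + 1]):
--             return "not snake", False
--     closing = _is_edge(cycle[0], cycle[-1])
--     if is_closed and not closing:
--         return "not snake", False
--     L = max(cycle).bit_length()
--     for i, v in enumerate(cycle):
--         for k in range(L):
--             j = index.get(v ^ (1 << k))
--             if j is not None and j > i + 1 and not (i == 0 and j == n - 1):
--                 return "not snake", False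
--     if is_closed:
--         return "coil", True
--     if closing:
--         return "almost coil", True
--     return "snake", True
-- ===== Notes on version B (the rewrite author's own statement) =====
-- stated objective: faster
-- what changed: Chord detection builds a dict from vertex to position once and probes each vertex's bit_length(max) single-bit flips with O(1) lookups instead of A's all-pairs Hamming-distance scan, and edges are tested with int.bit_count instead of A's hand-written popcount loop.
-- outside the precondition, e.g. on classify_path([-1, -2, -10, -9, -11], 4): A returns ('not snake', False), B returns ('snake', True); on classify_path([-1, -1], 2): A returns ('not snake', False), B returns ('not snake', False); on classify_path([-1, 0], 2): A does not finish within the time limit, B returns ('almost coil', True)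
import Mathlib
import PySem

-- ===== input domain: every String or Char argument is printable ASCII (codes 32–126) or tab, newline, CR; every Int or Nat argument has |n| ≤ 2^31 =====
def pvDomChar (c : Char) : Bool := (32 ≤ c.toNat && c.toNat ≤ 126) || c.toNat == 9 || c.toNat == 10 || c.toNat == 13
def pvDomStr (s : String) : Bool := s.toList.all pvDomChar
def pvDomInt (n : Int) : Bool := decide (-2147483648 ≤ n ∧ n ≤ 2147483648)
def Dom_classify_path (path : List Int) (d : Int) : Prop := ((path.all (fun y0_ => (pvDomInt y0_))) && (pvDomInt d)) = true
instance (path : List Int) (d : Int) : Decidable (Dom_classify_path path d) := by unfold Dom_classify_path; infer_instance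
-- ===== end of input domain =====

-- B replaces A's all-pairs Hamming chord scan by a hash index of the vertices probed with
-- single-bit flips, and the hand-written popcount loop by int.bit_count.

-- ===== PORT A =====
-- 'while x: c += x & 1; x >>= 1' — the '0 < x' guard makes the recursion total; for x < 0 the
-- Python loop never terminates (such inputs are excluded by Pre_classify_path).
def hammingLoop (x c : Int) : Int :=
  if 0 < x then hammingLoop (x >>> (1 : Nat)) (c + PySem.Int.band x 1) else c
termination_by x.toNat
decreasing_by
  have hs : x >>> (1 : Nat) = x / 2 := by rw [Int.shiftRight_eq_div_pow]; norm_num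
  omega

def hamming_dist (a b : Int) : Int := hammingLoop (PySem.Int.bxor a b) 0

-- 'for i in range(n-1): if hamming_dist(...) != 1: return ...' — early-return loop as .all
-- (indices i, i+1 are in range here, so the 0 default of pyGetD is never seen)
def aConsec (cycle : List Int) (n : Int) : Bool :=
  (PySem.List.pyRange 0 (n - 1) 1).all fun i =>
    hamming_dist (PySem.List.pyGetD cycle i 0) (PySem.List.pyGetD cycle (i + 1) 0) == 1

-- the nested 'for i … for j in range(i+1, n)' chord scan, early return as .all
def aChord (cycle : List Int) (n : Int) : Bool :=
  (PySem.List.pyRange 0 n 1).all fun i =>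
    (PySem.List.pyRange (i + 1) n 1).all fun j =>
      if j == i + 1 then true
      else if i == 0 && j == n - 1 then true
      else !(hamming_dist (PySem.List.pyGetD cycle i 0) (PySem.List.pyGetD cycle j 0) == 1)

def classify_path (path : List Int) (d : Int) : String × Bool :=
  if path = [] ∨ path.length ≤ 1 then ("snake", true)
  else
    let is_closed : Bool := PySem.List.pyGet? path 0 == PySem.List.pyGet? path (-1)
    let cycle : List Int := if is_closed then PySem.List.slice path none (some (-1)) else path
    let n : Int := PySem.List.len cycle
    if PySem.Set.len (PySem.Set.ofList cycle) ≠ n then ("not snake", false)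
    else if ¬ aConsec cycle n = true then ("not snake", false)
    else
      let closing_adjacent : Bool :=
        hamming_dist (PySem.List.pyGetD cycle 0 0) (PySem.List.pyGetD cycle (-1) 0) == 1
      if is_closed && !closing_adjacent then ("not snake", false)
      else if ¬ aChord cycle n = true then ("not snake", false)
      else if is_closed then ("coil", true)
      else if closing_adjacent then ("almost coil", true)
      else ("snake", true)

-- ===== PORT B =====
def is_edge (u v : Int) : Bool := PySem.Int.bitCount (PySem.Int.bxor u v) == 1

-- 'for i, v in enumerate(cycle): if v in index: return …; index[v] = i' — none = early return
def buildIndex : List (Int × Int) → PySem.Dict Int Int → Option (PySem.Dict Int Int)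
  | [], idx => some idx
  | (i, v) :: rest, idx =>
    if PySem.Dict.contains idx v then none
    else buildIndex rest (PySem.Dict.insert idx v i)

def bConsec (cycle : List Int) (n : Int) : Bool :=
  (PySem.List.pyRange 0 (n - 1) 1).all fun i =>
    is_edge (PySem.List.pyGetD cycle i 0) (PySem.List.pyGetD cycle (i + 1) 0)

-- the flip-and-look-up chord scan
def bChord (cycle : List Int) (n : Int) (idx : PySem.Dict Int Int) (L : Int) : Bool :=
  (PySem.List.enumerate cycle 0).all fun iv =>
    (PySem.List.pyRange 0 L 1).all fun k =>
      match PySem.Dict.get? idx (PySem.Int.bxor iv.2 ((1 : Int) <<< k.toNat)) with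
      | none => true
      | some j => !(decide (iv.1 + 1 < j) && !(iv.1 == 0 && j == n - 1))

def classify_path_alt (path : List Int) (d : Int) : String × Bool :=
  if path.length ≤ 1 then ("snake", true)
  else
    let is_closed : Bool := PySem.List.pyGet? path 0 == PySem.List.pyGet? path (-1)
    let cycle : List Int := if is_closed then PySem.List.slice path none (some (-1)) else path
    let n : Int := PySem.List.len cycle
    match buildIndex (PySem.List.enumerate cycle 0) PySem.Dict.empty with
    | none => ("not snake", false)
    | some idx =>
      if ¬ bConsec cycle n = true then ("not snake", false)
      else
        let closing : Bool :=
          is_edge (PySem.List.pyGetD cycle 0 0) (PySem.List.pyGetD cycle (-1) 0)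
        if is_closed && !closing then ("not snake", false)
        else
          -- L = max(cycle).bit_length(); cycle is nonempty here, so the getD default is never seen
          let L : Int := (PySem.Int.bitLength ((PySem.List.max? cycle fun x => x).getD 0) : Int)
          if ¬ bChord cycle n idx L = true then ("not snake", false)
          else if is_closed then ("coil", true)
          else if closing then ("almost coil", true)
          else ("snake", true)

-- ===== PRECONDITION & SPEC =====
-- the vertex sequence A actually inspects: the path without its duplicated endpoint when closed
def cycleOf (path : List Int) : List Int :=
  if path.head? = path.getLast? then path.dropLast else path

-- Pre_ admits trivial paths, duplicate-containing paths (A answers before any Hamming distance),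
-- and otherwise restricts to nonnegative vertex labels (the natural Q_d domain): with a negative
-- label A's hamming_dist while-loop diverges whenever it compares a mixed-sign pair, and B's
-- bit_length-bounded neighbour search is not meant to reproduce A's behaviour on negative labels.
def Pre_classify_path (path : List Int) (d : Int) : Prop :=
  path.length ≤ 1 ∨ ¬ (cycleOf path).Nodup ∨ ∀ x ∈ path, 0 ≤ x
instance (path : List Int) (d : Int) : Decidable (Pre_classify_path path d) := by
  unfold Pre_classify_path; infer_instance

def pvWitness_classify_path : List Int × Int := ([0, 1, 3, 2, 0], 2)

def Spec_classify_path (path : List Int) (d : Int) (out : String × Bool) : Prop := out = classify_path_alt path d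
instance (path : List Int) (d : Int) (out : String × Bool) : Decidable (Spec_classify_path path d out) := by unfold Spec_classify_path; infer_instance

-- ===== CLAIM (what is proved, stated in full; the proofs are below) =====
def Claim_equal_classify_path : Prop := ∀ (path : List Int) (d : Int), Dom_classify_path path d → Pre_classify_path path d → Spec_classify_path path d (classify_path path d)

-- ===== LEMMAS AND PROOFS =====

-- A's popcount loop computes bit_count (on nonnegative arguments)
theorem hammingLoop_eq_bitCount : ∀ (m : Nat) (x c : Int), 0 ≤ x → x.toNat ≤ m →
    hammingLoop x c = c + (PySem.Int.bitCount x : Int) := by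
  intro m
  induction m with
  | zero =>
    intro x c hx hm
    have : x = 0 := by omega
    subst this
    rw [hammingLoop]
    simp [PySem.Int.bitCount_zero]
  | succ m ih =>
    intro x c hx hm
    rw [hammingLoop]
    by_cases h : 0 < x
    · rw [if_pos h]
      have hs : x >>> (1 : Nat) = x / 2 := by rw [Int.shiftRight_eq_div_pow]; norm_num
      have hf : PySem.Int.floordiv x 2 = x / 2 := PySem.Int.floordiv_eq_ediv_of_pos (by norm_num)
      have hmod : PySem.Int.mod x 2 = x % 2 := PySem.Int.mod_eq_emod_of_pos (by norm_num)
      rw [hs, ih (x / 2) (c + PySem.Int.band x 1) (by omega) (by omega)]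
      rw [PySem.Int.bitCount_of_pos h, hf, hmod, PySem.Int.band_one, hmod]
      push_cast
      omega
    · rw [if_neg h]
      have : x = 0 := by omega
      subst this
      simp [PySem.Int.bitCount_zero]

theorem bitCount_ne_zero : ∀ m : Nat, 0 < m → PySem.Int.bitCount (m : Int) ≠ 0 := by
  intro m
  induction m using Nat.strong_induction_on with
  | _ m ih =>
    intro hm
    rw [PySem.Int.bitCount_natCast hm]
    rcases Nat.even_or_odd m with he | ho
    · have h2 : m % 2 = 0 := Nat.even_iff.mp he
      have hp : 0 < m / 2 := by omega
      have := ih (m / 2) (by omega) hp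
      omega
    · have h2 : m % 2 = 1 := Nat.odd_iff.mp ho
      omega

-- bit_count m = 1 ↔ m is a power of two
theorem bitCount_eq_one_iff : ∀ m : Nat, PySem.Int.bitCount (m : Int) = 1 ↔ ∃ k, m = 2 ^ k := by
  intro m
  induction m using Nat.strong_induction_on with
  | _ m ih =>
    by_cases hm : 0 < m
    · rw [PySem.Int.bitCount_natCast hm]
      rcases Nat.even_or_odd m with he | ho
      · have h2 : m % 2 = 0 := Nat.even_iff.mp he
        have hp : 0 < m / 2 := by omega
        rw [h2]
        simp only [Nat.zero_add]
        rw [ih (m / 2) (by omega)]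
        constructor
        · rintro ⟨k, hk⟩
          exact ⟨k + 1, by rw [pow_succ]; omega⟩
        · rintro ⟨k, hk⟩
          rcases k with _ | k
          · omega
          · exact ⟨k, by rw [pow_succ] at hk; omega⟩
      · have h2 : m % 2 = 1 := Nat.odd_iff.mp ho
        rw [h2]
        constructor
        · intro h
          have hz : PySem.Int.bitCount ((m / 2 : Nat) : Int) = 0 := by omega
          have : m / 2 = 0 := by
            by_contra hc
            exact bitCount_ne_zero (m / 2) (by omega) hz
          exact ⟨0, by omega⟩
        · rintro ⟨k, hk⟩
          rcases k with _ | k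
          · have : m = 1 := by simpa using hk
            subst this
            simp [PySem.Int.bitCount_zero]
          · exfalso
            have : m % 2 = 0 := by
              subst hk
              simp [pow_succ, Nat.mul_mod_left]
            omega
    · have : m = 0 := by omega
      subst this
      simp [PySem.Int.bitCount_zero]
      intro k
      positivity

theorem one_shiftLeft_int (k : Nat) : (1 : Int) <<< k = ((2 ^ k : Nat) : Int) := by
  simp [Int.shiftLeft_eq]

-- A's adjacency test agrees with B's on nonnegative labels
theorem adj_eq (a b : Int) (ha : 0 ≤ a) (hb : 0 ≤ b) :
    (hamming_dist a b == 1) = is_edge a b := by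
  have hx : PySem.Int.bxor a b = ((a.toNat ^^^ b.toNat : Nat) : Int) :=
    PySem.Int.bxor_of_nonneg ha hb
  unfold hamming_dist is_edge
  rw [hammingLoop_eq_bitCount (PySem.Int.bxor a b).toNat _ _ (by rw [hx]; positivity) le_rfl]
  simp only [zero_add]
  generalize PySem.Int.bitCount (PySem.Int.bxor a b) = c
  cases hc : c == 1
  · simp only [beq_eq_false_iff_ne, ne_eq] at hc
    simpa [beq_eq_false_iff_ne] using (by omega : ¬ ((c : Int) = 1))
  · simp only [beq_iff_eq] at hc
    subst hc
    simp

-- xor with a single-bit flip is an edge …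
theorem flip_bwd (a : Int) (ha : 0 ≤ a) (k : Nat) :
    is_edge a (PySem.Int.bxor a ((1 : Int) <<< k)) = true := by
  rw [one_shiftLeft_int]
  have h1 : PySem.Int.bxor a ((2 ^ k : Nat) : Int) = ((a.toNat ^^^ 2 ^ k : Nat) : Int) := by
    have := PySem.Int.bxor_of_nonneg ha (by positivity : (0:Int) ≤ ((2 ^ k : Nat) : Int))
    simpa using this
  rw [h1]
  unfold is_edge
  have h2 : PySem.Int.bxor a ((a.toNat ^^^ 2 ^ k : Nat) : Int)
      = ((a.toNat ^^^ (a.toNat ^^^ 2 ^ k) : Nat) : Int) := by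
    have := PySem.Int.bxor_of_nonneg ha
      (by positivity : (0:Int) ≤ ((a.toNat ^^^ 2 ^ k : Nat) : Int))
    simpa using this
  rw [h2]
  have h3 : a.toNat ^^^ (a.toNat ^^^ 2 ^ k) = 2 ^ k := by
    rw [← Nat.xor_assoc, Nat.xor_self, Nat.zero_xor]
  rw [h3]
  simpa [beq_iff_eq] using (bitCount_eq_one_iff (2 ^ k)).mpr ⟨k, rfl⟩

-- … and every edge between labels below 2^S is a single-bit flip with bit index below S
theorem flip_fwd (a b : Int) (ha : 0 ≤ a) (hb : 0 ≤ b) (S : Nat)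
    (hA : a.toNat < 2 ^ S) (hB : b.toNat < 2 ^ S) (he : is_edge a b = true) :
    ∃ k < S, b = PySem.Int.bxor a ((1 : Int) <<< k) := by
  have hx : PySem.Int.bxor a b = ((a.toNat ^^^ b.toNat : Nat) : Int) :=
    PySem.Int.bxor_of_nonneg ha hb
  unfold is_edge at he
  rw [hx] at he
  simp only [beq_iff_eq] at he
  obtain ⟨k, hk⟩ := (bitCount_eq_one_iff _).mp he
  have hlt : 2 ^ k < 2 ^ S := hk ▸ Nat.xor_lt_two_pow hA hB
  have hkS : k < S := (Nat.pow_lt_pow_iff_right (by norm_num)).mp hlt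
  refine ⟨k, hkS, ?_⟩
  rw [one_shiftLeft_int]
  have h1 : PySem.Int.bxor a ((2 ^ k : Nat) : Int) = ((a.toNat ^^^ 2 ^ k : Nat) : Int) := by
    have := PySem.Int.bxor_of_nonneg ha (by positivity : (0:Int) ≤ ((2 ^ k : Nat) : Int))
    simpa using this
  rw [h1, ← hk, ← Nat.xor_assoc, Nat.xor_self, Nat.zero_xor]
  omega

theorem list_all_congr {α : Type} (l : List α) (p q : α → Bool)
    (h : ∀ x ∈ l, p x = q x) : l.all p = l.all q := by
  induction l with
  | nil => rfl
  | cons x xs ih =>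
    simp only [List.all_cons, h x (by simp), ih (fun y hy => h y (by simp [hy]))]

theorem inRange_of (xs : List Int) (i : Int) (h1 : -(xs.length : Int) ≤ i) (h2 : i < xs.length) :
    PySem.Raise.InRange xs.length i := by
  simp [PySem.Raise.InRange]; omega

-- B's duplicate-detecting index build succeeds exactly on fresh, duplicate-free keys
theorem buildIndex_isSome_iff : ∀ (l : List (Int × Int)) (idx : PySem.Dict Int Int),
    (buildIndex l idx).isSome ↔ ((l.map Prod.snd).Nodup ∧ ∀ p ∈ l, idx.contains p.2 = false) := by
  intro l
  induction l with
  | nil => simp [buildIndex]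
  | cons hd rest ih =>
    obtain ⟨i, v⟩ := hd
    intro idx
    rw [buildIndex]
    by_cases hc : PySem.Dict.contains idx v = true
    · rw [if_pos hc]
      simp only [Option.isSome_none, Bool.false_eq_true, false_iff]
      rintro ⟨-, h2⟩
      have := h2 (i, v) (by simp)
      simp at this
      rw [this] at hc
      simp at hc
    · rw [if_neg hc, ih]
      simp only [List.map_cons, List.nodup_cons, List.mem_map, List.mem_cons]
      constructor
      · rintro ⟨hnd, hall⟩
        refine ⟨⟨?_, hnd⟩, ?_⟩
        · rintro ⟨p, hp, hpv⟩
          have := hall p hp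
          rw [PySem.Dict.contains_insert] at this
          simp [hpv] at this
        · rintro p (rfl | hp)
          · simpa using hc
          · have := hall p hp
            rw [PySem.Dict.contains_insert] at this
            simp at this
            exact this.2
      · rintro ⟨⟨hnm, hnd⟩, hall⟩
        refine ⟨hnd, ?_⟩
        intro p hp
        rw [PySem.Dict.contains_insert]
        simp only [Bool.or_eq_false_iff]
        constructor
        · simp only [beq_eq_false_iff_ne, ne_eq]
          intro hpv
          exact hnm ⟨p, hp, hpv⟩
        · exact hall p (by simp [hp])

-- lookups in the finished index are exactly the recorded (position, vertex) pairs
theorem buildIndex_get? : ∀ (l : List (Int × Int)) (idx idx' : PySem.Dict Int Int),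
    buildIndex l idx = some idx' →
    ∀ u j, (idx'.get? u = some j ↔ ((j, u) ∈ l ∨ idx.get? u = some j)) := by
  intro l
  induction l with
  | nil =>
    intro idx idx' h u j
    simp only [buildIndex, Option.some.injEq] at h
    subst h
    simp
  | cons hd rest ih =>
    obtain ⟨i, v⟩ := hd
    intro idx idx' h u j
    rw [buildIndex] at h
    by_cases hc : PySem.Dict.contains idx v = true
    · rw [if_pos hc] at h; exact absurd h (by simp)
    · rw [if_neg hc] at h
      rw [ih _ _ h]
      have hg : PySem.Dict.get? idx v = none := by
        rw [PySem.Dict.get?_eq_none_iff_contains]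
        simpa using hc
      by_cases huv : u = v
      · subst huv
        rw [PySem.Dict.get?_insert_self, hg]
        simp only [List.mem_cons, Prod.mk.injEq, Option.some.injEq]
        constructor
        · rintro (hmem | hji)
          · exact Or.inl (Or.inr hmem)
          · exact Or.inl (Or.inl (by simp [hji]))
        · rintro ((⟨rfl, -⟩ | hmem) | hnone)
          · exact Or.inr rfl
          · exact Or.inl hmem
          · simp at hnone
      · rw [PySem.Dict.get?_insert_of_ne _ _ huv]
        simp only [List.mem_cons, Prod.mk.injEq]
        constructor
        · rintro (hmem | hidx)
          · exact Or.inl (Or.inr hmem)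
          · exact Or.inr hidx
        · rintro ((⟨-, hv⟩ | hmem) | hidx)
          · exfalso; omega
          · exact Or.inl hmem
          · exact Or.inr hidx

-- len(set(xs)) == len(xs) iff xs has no duplicates
theorem ofList_length_eq_iff (xs : List Int) :
    (PySem.Set.ofList xs).length = xs.length ↔ xs.Nodup := by
  constructor
  · intro h
    have h1 : (PySem.Set.ofList xs).toFinset = xs.toFinset := by
      ext x
      simp [List.mem_toFinset, PySem.Set.mem_ofList]
    have h2 := List.card_toFinset (PySem.Set.ofList xs)
    have h3 := List.card_toFinset xs
    have h4 : (PySem.Set.ofList xs).dedup = PySem.Set.ofList xs :=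
      List.Nodup.dedup (PySem.Set.nodup_ofList xs)
    rw [h1, h3] at h2
    rw [h4] at h2
    have h5 : xs.dedup = xs := List.Sublist.eq_of_length (List.dedup_sublist xs) (by omega)
    rw [← h5]
    exact List.nodup_dedup xs
  · intro h
    rw [PySem.Set.ofList_eq_self_of_nodup xs h]

-- the consecutive-edge scans agree pointwise
theorem consec_eq (cycle : List Int) (hnn : ∀ v ∈ cycle, 0 ≤ v) :
    aConsec cycle (PySem.List.len cycle) = bConsec cycle (PySem.List.len cycle) := by
  unfold aConsec bConsec
  apply list_all_congr
  intro i hi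
  rw [PySem.List.mem_pyRange_one] at hi
  simp only [PySem.List.len_eq] at hi
  apply adj_eq
  · exact hnn _ (PySem.List.pyGetD_mem cycle 0 (inRange_of cycle i (by omega) (by omega)))
  · exact hnn _ (PySem.List.pyGetD_mem cycle 0 (inRange_of cycle (i + 1) (by omega) (by omega)))

-- the property both chord scans decide
def NoChordP (cycle : List Int) : Prop :=
  ∀ (i j : Nat) (hi : i < cycle.length) (hj : j < cycle.length),
    i < j → j ≠ i + 1 → ¬(i = 0 ∧ j = cycle.length - 1) → is_edge cycle[i] cycle[j] = false

theorem aChord_iff (cycle : List Int) (hnn : ∀ v ∈ cycle, 0 ≤ v) :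
    (aChord cycle (PySem.List.len cycle) = true ↔ NoChordP cycle) := by
  unfold aChord
  simp only [List.all_eq_true, PySem.List.mem_pyRange_one, PySem.List.len_eq, and_imp]
  constructor
  · intro H i j hi hj hij hne hend
    have h1 := H (i : Int) (by omega) (by omega) (j : Int) (by omega) (by omega)
    rw [if_neg (by simp only [beq_iff_eq]; omega)] at h1
    rw [if_neg (by simp only [Bool.and_eq_true, beq_iff_eq]; omega)] at h1
    rw [PySem.List.pyGetD_eq_getElem cycle 0 (by omega) (by omega),
        PySem.List.pyGetD_eq_getElem cycle 0 (by omega) (by omega)] at h1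
    simp only [Int.toNat_natCast] at h1
    rw [adj_eq _ _ (hnn _ (List.getElem_mem _)) (hnn _ (List.getElem_mem _))] at h1
    simpa using h1
  · intro H i h0i hin j hij hjn
    by_cases h1 : (j == i + 1) = true
    · rw [if_pos h1]
    · rw [if_neg h1]
      by_cases h2 : (i == 0 && j == (cycle.length : Int) - 1) = true
      · rw [if_pos h2]
      · rw [if_neg h2]
        rw [PySem.List.pyGetD_eq_getElem cycle 0 (by omega) (by omega),
            PySem.List.pyGetD_eq_getElem cycle 0 (by omega) (by omega)]
        rw [adj_eq _ _ (hnn _ (List.getElem_mem _)) (hnn _ (List.getElem_mem _))]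
        simp only [beq_iff_eq] at h1
        simp only [Bool.and_eq_true, beq_iff_eq] at h2
        rw [H i.toNat j.toNat (by omega) (by omega) (by omega) (by omega) (by omega)]
        rfl

-- the loop body of B's chord scan, as a proposition
theorem chordCond_iff (p j n : Int) :
    ((!(decide (p + 1 < j) && !(p == 0 && j == n - 1))) = true)
      ↔ (j ≤ p + 1 ∨ (p = 0 ∧ j = n - 1)) := by
  by_cases h1 : p + 1 < j <;> by_cases h2 : p = 0 <;> by_cases h3 : j = n - 1 <;>
    simp [h1, h2, h3] <;> omega

theorem bChord_iff (cycle : List Int) (idx : PySem.Dict Int Int)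
    (hnn : ∀ v ∈ cycle, 0 ≤ v) (hne : cycle ≠ [])
    (hidx : buildIndex (PySem.List.enumerate cycle 0) PySem.Dict.empty = some idx) :
    (bChord cycle (PySem.List.len cycle) idx
      ((PySem.Int.bitLength ((PySem.List.max? cycle fun x => x).getD 0) : Int)) = true
      ↔ NoChordP cycle) := by
  obtain ⟨m, hm⟩ : ∃ m, PySem.List.max? cycle (fun x => x) = some m := by
    cases h : PySem.List.max? cycle (fun x => x) with
    | none => rw [PySem.List.max?_eq_none_iff] at h; exact absurd h hne
    | some m => exact ⟨m, rfl⟩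
  have hmax : ∀ y ∈ cycle, y ≤ m := by
    have := PySem.List.max?_isMax hm
    simpa using this
  set S := PySem.Int.bitLength m with hS
  have hbound : ∀ v ∈ cycle, v.toNat < 2 ^ S := by
    intro v hv
    have h1 : v ≤ m := hmax v hv
    have h2 : m.natAbs < 2 ^ S := PySem.Int.lt_two_pow_bitLength m
    have h3 : 0 ≤ m := le_trans (hnn v hv) h1
    omega
  have hget : ∀ u j, (idx.get? u = some j
      ↔ ∃ (t : Nat), ∃ (_ : t < cycle.length), j = (t : Int) ∧ cycle[t] = u) := by
    intro u j
    rw [buildIndex_get? _ _ _ hidx]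
    simp only [PySem.Dict.get?_empty, reduceCtorEq, or_false, PySem.List.mem_enumerate_iff]
    constructor
    · rintro ⟨t, ht, hp⟩
      rw [Prod.mk.injEq] at hp
      exact ⟨t, ht, by omega, hp.2.symm⟩
    · rintro ⟨t, ht, hj, hc⟩
      refine ⟨t, ht, ?_⟩
      rw [Prod.mk.injEq]
      exact ⟨by omega, hc.symm⟩
  have hgd : (PySem.List.max? cycle fun x => x).getD 0 = m := by rw [hm]; rfl
  rw [hgd]
  unfold bChord
  simp only [List.all_eq_true, PySem.List.mem_pyRange_one, PySem.List.len_eq,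
    PySem.List.mem_enumerate_iff, and_imp]
  constructor
  · intro H i j hi hj hij hne1 hend
    by_contra hedge
    rw [Bool.not_eq_false] at hedge
    obtain ⟨k, hkS, hflip⟩ := flip_fwd cycle[i] cycle[j]
      (hnn _ (List.getElem_mem _)) (hnn _ (List.getElem_mem _)) S
      (hbound _ (List.getElem_mem _)) (hbound _ (List.getElem_mem _)) hedge
    have h1 := H ((i : Int), cycle[i]) ⟨i, hi, by simp⟩ (k : Int) (by omega) (by omega)
    have h2 : PySem.Dict.get? idx
        (PySem.Int.bxor cycle[i] ((1 : Int) <<< ((k : Int)).toNat)) = some (j : Int) := by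
      rw [hget]
      refine ⟨j, hj, rfl, ?_⟩
      simpa using hflip
    rw [h2] at h1
    replace h1 : (!(decide ((i : Int) + 1 < (j : Int)) &&
        !((i : Int) == 0 && (j : Int) == (cycle.length : Int) - 1))) = true := h1
    rw [chordCond_iff] at h1
    rcases h1 with h1 | ⟨h1a, h1b⟩
    · omega
    · exact hend ⟨by omega, by omega⟩
  · intro H iv hiv k hk0 hkL
    obtain ⟨t, ht, rfl⟩ := hiv
    cases hg : PySem.Dict.get? idx (PySem.Int.bxor cycle[t] ((1 : Int) <<< k.toNat)) with
    | none => rfl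
    | some j =>
      obtain ⟨s, hs, rfl, hcs⟩ := (hget _ _).mp hg
      show (!(decide ((0 : Int) + (t : Int) + 1 < (s : Int)) &&
        !(((0 : Int) + (t : Int)) == 0 && (s : Int) == (cycle.length : Int) - 1))) = true
      rw [chordCond_iff]
      by_cases hend : t = 0 ∧ s = cycle.length - 1
      · right
        exact ⟨by omega, by omega⟩
      · left
        by_contra hgt
        rw [not_le] at hgt
        have hedge : is_edge cycle[t] cycle[s] = true := by
          rw [hcs]
          exact flip_bwd _ (hnn _ (List.getElem_mem _)) k.toNat
        have hfalse := H t s ht hs (by omega) (by omega) hend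
        rw [hedge] at hfalse
        simp at hfalse

-- ===== VERDICT (by name: the statement is the Claim_ definition above) =====
theorem classify_path_spec : Claim_equal_classify_path := by
  intro path d hdom hpre
  unfold Spec_classify_path
  by_cases hlen : path.length ≤ 1
  · rw [classify_path, classify_path_alt, if_pos (Or.inr hlen), if_pos hlen]
  · have hA : ¬(path = [] ∨ path.length ≤ 1) := by
      rintro (rfl | h)
      · simp at hlen
      · exact hlen h
    rw [classify_path, classify_path_alt]
    simp only [if_neg hA, if_neg hlen]
    set ic : Bool := PySem.List.pyGet? path 0 == PySem.List.pyGet? path (-1) with hic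
    set cycle : List Int :=
      if ic then PySem.List.slice path none (some (-1)) else path with hcy
    have hsub : ∀ v ∈ cycle, v ∈ path := by
      intro v hv
      rw [hcy] at hv
      by_cases h : ic = true
      · rw [if_pos h, PySem.List.slice_to_neg_one] at hv
        exact List.dropLast_subset _ hv
      · rw [if_neg h] at hv
        exact hv
    have hnec : cycle ≠ [] := by
      rw [hcy]
      by_cases h : ic = true
      · rw [if_pos h, PySem.List.slice_to_neg_one]
        have : path.dropLast.length = path.length - 1 := List.length_dropLast
        intro hc
        rw [hc] at this
        simp at this
        omega
      · rw [if_neg h]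
        intro hc
        subst hc
        simp at hlen
    have hcyc_eq : cycle = cycleOf path := by
      rw [hcy, hic]
      unfold cycleOf
      by_cases h : path.head? = path.getLast?
      · rw [if_pos h, if_pos, PySem.List.slice_to_neg_one]
        rw [PySem.List.pyGet?_zero, PySem.List.pyGet?_neg_one, beq_iff_eq,
          ← List.head?_eq_getElem?]
        exact h
      · rw [if_neg h, if_neg]
        rw [PySem.List.pyGet?_zero, PySem.List.pyGet?_neg_one, beq_iff_eq,
          ← List.head?_eq_getElem?]
        exact h
    by_cases hnd : cycle.Nodup
    · -- no duplicates: both duplicate checks pass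
      have hnn : ∀ v ∈ cycle, 0 ≤ v := by
        rcases hpre with h | h | h
        · exact absurd h hlen
        · rw [← hcyc_eq] at h; exact absurd hnd h
        · exact fun v hv => h v (hsub v hv)
      have hsl : ¬ PySem.Set.len (PySem.Set.ofList cycle) ≠ PySem.List.len cycle := by
        simp only [PySem.Set.len, PySem.List.len_eq, ne_eq, not_not]
        exact_mod_cast (ofList_length_eq_iff cycle).mpr hnd
      obtain ⟨idx, hidx⟩ : ∃ idx,
          buildIndex (PySem.List.enumerate cycle 0) PySem.Dict.empty = some idx := by
        have hsome : (buildIndex (PySem.List.enumerate cycle 0) PySem.Dict.empty).isSome := by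
          rw [buildIndex_isSome_iff]
          refine ⟨?_, ?_⟩
          · rw [show (PySem.List.enumerate cycle 0).map Prod.snd = cycle from
              PySem.List.map_snd_enumerate cycle 0]
            exact hnd
          · intro p hp
            exact PySem.Dict.contains_empty p.2
        exact Option.isSome_iff_exists.mp hsome
      rw [if_neg hsl, hidx]
      rw [consec_eq cycle hnn]
      have hin0 : PySem.Raise.InRange cycle.length 0 := inRange_of cycle 0 (by omega)
        (by simp only [Nat.cast_pos]; exact List.length_pos_iff.mpr hnec)
      have hinm : PySem.Raise.InRange cycle.length (-1) := inRange_of cycle (-1)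
        (by have := List.length_pos_iff.mpr hnec; omega)
        (by have := List.length_pos_iff.mpr hnec; omega)
      rw [adj_eq (PySem.List.pyGetD cycle 0 0) (PySem.List.pyGetD cycle (-1) 0)
        (hnn _ (PySem.List.pyGetD_mem cycle 0 hin0))
        (hnn _ (PySem.List.pyGetD_mem cycle 0 hinm))]
      rw [show aChord cycle (PySem.List.len cycle)
          = bChord cycle (PySem.List.len cycle) idx
              ((PySem.Int.bitLength ((PySem.List.max? cycle fun x => x).getD 0) : Int)) from
        Bool.eq_iff_iff.mpr ((aChord_iff cycle hnn).trans (bChord_iff cycle idx hnn hnec hidx).symm)]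
    · -- duplicates: both sides return ("not snake", false)
      have hsl : PySem.Set.len (PySem.Set.ofList cycle) ≠ PySem.List.len cycle := by
        simp only [PySem.Set.len, PySem.List.len_eq, ne_eq]
        intro hc
        exact hnd ((ofList_length_eq_iff cycle).mp (by exact_mod_cast hc))
      have hnone : buildIndex (PySem.List.enumerate cycle 0) PySem.Dict.empty = none := by
        rw [← Option.not_isSome_iff_eq_none]
        rw [buildIndex_isSome_iff]
        rintro ⟨h1, -⟩
        rw [show (PySem.List.enumerate cycle 0).map Prod.snd = cycle from
          PySem.List.map_snd_enumerate cycle 0] at h1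
        exact hnd h1
      rw [if_pos hsl, hnone]
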